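-- pv_equiv track=rewrite | github.com/sungu1516/algorithm-study | swea/D3/5207_이진탐색/s1.py | is_bidirect
-- ===== SOURCE A (Python) =====
-- def is_bidirect(arr, target):
--     left = 0
--     right = 0
--
--     start, end = 0, len(arr) - 1
--     while start <= end:
--         mid = (start + end) // 2
--
--         if target == arr[mid]:
--             return True
--         elif target > arr[mid]:
--             start = mid + 1
--             left += 1
--             curr = 'R'
--         else:
--             end = mid - 1
--             right += 1
--             curr = "L"
--
--         if abs(left-right) > 2:
--             return False
--
--     return False
-- ===== SOURCE B (Python) =====
-- def is_bidirect(arr, target):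
--     # Phase 1: run a plain binary search, recording each step's direction (+1 right, -1 left).
--     steps = []
--     start, end = 0, len(arr) - 1
--     found = False
--     while start <= end:
--         mid = (start + end) // 2
--         if target == arr[mid]:
--             found = True
--             break
--         elif target > arr[mid]:
--             steps.append(1)
--             start = mid + 1
--         else:
--             steps.append(-1)
--             end = mid - 1
--     if not found:
--         return False
--     # Phase 2: the search only counts if no prefix imbalance ever exceeded 2.
--     s = 0
--     for d in steps:
--         s += d
--         if abs(s) > 2:
--             return False
--     return True
-- ===== Notes on version B (the rewrite author's own statement) =====
-- stated objective: alternative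
-- what changed: B splits the task in two phases: it first records the direction sequence of a plain binary search, then separately checks that no prefix imbalance of that sequence exceeds 2, instead of A's fused loop threading left/right counters and bailing out mid-search.
import Mathlib
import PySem

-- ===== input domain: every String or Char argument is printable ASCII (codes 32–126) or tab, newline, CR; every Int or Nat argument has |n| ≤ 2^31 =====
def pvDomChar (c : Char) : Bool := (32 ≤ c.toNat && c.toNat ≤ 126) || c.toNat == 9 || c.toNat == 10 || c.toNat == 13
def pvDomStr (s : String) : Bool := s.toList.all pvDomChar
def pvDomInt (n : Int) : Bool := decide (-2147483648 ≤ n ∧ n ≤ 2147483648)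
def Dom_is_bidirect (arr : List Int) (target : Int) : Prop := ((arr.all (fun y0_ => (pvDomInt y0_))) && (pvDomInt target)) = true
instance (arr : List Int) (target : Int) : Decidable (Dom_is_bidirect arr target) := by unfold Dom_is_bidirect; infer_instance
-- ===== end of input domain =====

-- B replaces A's fused counter-threading loop by two phases: record the binary-search
-- direction sequence, then check the prefix-imbalance constraint separately (alternative decomposition).


-- ===== PORT A =====
-- A's while loop as a fuel recursion over the state (start, end, left, right);
-- fuel arr.length + 1 is ample since the range shrinks every iteration.
-- arr[mid] is always in range here, so the `none` arm is unreachable.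
def pvGoA (arr : List Int) (target : Int) : Nat → Int → Int → Int → Int → Bool
  | 0, _, _, _, _ => false
  | fuel + 1, start, en, left, right =>
    if start ≤ en then
      let mid := PySem.Int.floordiv (start + en) 2
      match PySem.List.pyGet? arr mid with
      | none => false
      | some v =>
        if target = v then true
        else if target > v then
          if ((left + 1) - right).natAbs > 2 then false
          else pvGoA arr target fuel (mid + 1) en (left + 1) right
        else
          if (left - (right + 1)).natAbs > 2 then false
          else pvGoA arr target fuel start (mid - 1) left (right + 1)
    else false

def is_bidirect (arr : List Int) (target : Int) : Bool :=
  pvGoA arr target (arr.length + 1) 0 ((arr.length : Int) - 1) 0 0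

-- ===== PORT B =====
-- Phase 1 of Source B: plain binary search returning (found, direction steps).
def pvPath (arr : List Int) (target : Int) : Nat → Int → Int → Bool × List Int
  | 0, _, _ => (false, [])
  | fuel + 1, start, en =>
    if start ≤ en then
      let mid := PySem.Int.floordiv (start + en) 2
      match PySem.List.pyGet? arr mid with
      | none => (false, [])
      | some v =>
        if target = v then (true, [])
        else if target > v then
          let r := pvPath arr target fuel (mid + 1) en
          (r.1, 1 :: r.2)
        else
          let r := pvPath arr target fuel start (mid - 1)
          (r.1, (-1 : Int) :: r.2)
    else (false, [])

-- Phase 2 of Source B: prefix-sum imbalance check.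
def pvCheck : Int → List Int → Bool
  | _, [] => true
  | s, d :: ds => if (s + d).natAbs > 2 then false else pvCheck (s + d) ds

def is_bidirect_alt (arr : List Int) (target : Int) : Bool :=
  let r := pvPath arr target (arr.length + 1) 0 ((arr.length : Int) - 1)
  if r.1 = false then false else pvCheck 0 r.2

-- ===== PRECONDITION & SPEC =====
def Spec_is_bidirect (arr : List Int) (target : Int) (out : Bool) : Prop := out = is_bidirect_alt arr target
instance (arr : List Int) (target : Int) (out : Bool) : Decidable (Spec_is_bidirect arr target out) := by unfold Spec_is_bidirect; infer_instance

-- ===== CLAIM (what is proved, stated in full; the proofs are below) =====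
def Claim_equal_is_bidirect : Prop := ∀ (arr : List Int) (target : Int), Dom_is_bidirect arr target → Spec_is_bidirect arr target (is_bidirect arr target)

-- ===== LEMMAS AND PROOFS =====
-- A's fused loop equals "found && prefix-check", with the running imbalance left - right.
theorem pvGoA_eq (arr : List Int) (target : Int) :
    ∀ (fuel : Nat) (start en left right : Int),
      pvGoA arr target fuel start en left right =
        ((pvPath arr target fuel start en).1 &&
          pvCheck (left - right) (pvPath arr target fuel start en).2) := by
  intro fuel
  induction fuel with
  | zero => intro start en left right; simp [pvGoA, pvPath]
  | succ n ih =>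
    intro start en left right
    simp only [pvGoA, pvPath]
    split
    · cases h : PySem.List.pyGet? arr (PySem.Int.floordiv (start + en) 2) with
      | none => simp
      | some v =>
        simp only
        split
        · simp [pvCheck]
        · split
          · have e : left + 1 - right = left - right + 1 := by ring
            rw [ih]
            simp only [pvCheck, e]
            split
            · simp [*]
            · rfl
          · have e : left - (right + 1) = left - right + (-1) := by ring
            rw [ih]
            simp only [pvCheck, e]
            split
            · simp [*]
            · rfl
    · simp

-- ===== VERDICT (by name: the statement is the Claim_ definition above) =====
theorem is_bidirect_spec : Claim_equal_is_bidirect := by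
  intro arr target _
  unfold Spec_is_bidirect is_bidirect is_bidirect_alt
  rw [pvGoA_eq]
  cases h : (pvPath arr target (arr.length + 1) 0 ((arr.length : Int) - 1)).1 <;> simp [h]
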